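-- pv_equiv track=rewrite | github.com/eloyhz/competitive-programming | cpbook/3_problem_solving_paradigms/12192_grapevine_tle.py | best_lower
-- ===== SOURCE A (Python) =====
-- import bisect
--
-- def best_lower(n, m, field, l):
-- 	lower = []
-- 	for i, f in enumerate(field):
-- 		low = bisect.bisect(f, l)
-- 		prev = False
-- 		while 0 < low < m and f[low - 1] == l:
-- 			prev = True
-- 			low -= 1
-- 			lower.append((min(m - low if m > low else 1, n - i), i, low))
-- 		if not prev:
-- 			lower.append((min(m - low if m > low else 1, n - i), i, low))
-- 	return sorted(lower, reverse=True)
-- ===== SOURCE B (Python) =====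
-- import bisect
--
-- def best_lower(n, m, field, l):
--     out = []
--     for i, f in enumerate(field):
--         r = bisect.bisect(f, l)
--         run = 0
--         for x in f[:r]:
--             run = run + 1 if x == l else 0
--         if run and r < m:
--             for j in range(run):
--                 out.append((min(m - (r - 1 - j), n - i), i, r - 1 - j))
--         else:
--             out.append((min(m - r, n - i) if m > r else min(1, n - i), i, r))
--     return sorted(out, reverse=True)
-- ===== Notes on version B (the rewrite author's own statement) =====
-- stated objective: alternative
-- what changed: B replaces A's backward while-walk with its prev flag by a single forward pass that counts the trailing run of l in f[:r] and then emits the run's tuples directly from a range; the fallback tuple is produced by one explicit branch instead of the loop's leftover state.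
import Mathlib
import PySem

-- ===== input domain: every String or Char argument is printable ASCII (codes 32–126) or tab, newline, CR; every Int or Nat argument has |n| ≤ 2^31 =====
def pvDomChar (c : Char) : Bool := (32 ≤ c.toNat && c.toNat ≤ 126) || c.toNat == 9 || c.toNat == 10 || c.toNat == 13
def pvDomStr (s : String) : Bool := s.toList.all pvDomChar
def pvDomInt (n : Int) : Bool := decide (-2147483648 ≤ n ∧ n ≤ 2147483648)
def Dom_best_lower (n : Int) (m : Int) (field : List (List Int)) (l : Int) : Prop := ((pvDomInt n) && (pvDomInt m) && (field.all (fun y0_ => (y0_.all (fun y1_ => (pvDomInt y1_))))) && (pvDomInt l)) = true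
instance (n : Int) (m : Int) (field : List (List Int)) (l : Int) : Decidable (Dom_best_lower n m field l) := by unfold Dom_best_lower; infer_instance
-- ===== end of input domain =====

-- B replaces A's backward while-walk (with its prev flag) by one forward pass counting the
-- trailing run of l in f[:r] and a direct range emission; objective: alternative (same cost).

-- Python's lexicographic '<' on int triples (shared by both ports' final sorted(..., reverse=True)).
def tripLt (a b : Int × Int × Int) : Bool :=
  a.1 < b.1 || (a.1 == b.1 && (a.2.1 < b.2.1 || (a.2.1 == b.2.1 && a.2.2 < b.2.2)))

-- sorted(xs, reverse=True) on int triples: PySem's stable insertion sort with the tuple order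
-- (PySem.List.sorted needs a scalar key; this is its foldl/insertBy form, cf. sorted_rev_eq_foldl_insertBy).
def sortedRevTrip (xs : List (Int × Int × Int)) : List (Int × Int × Int) :=
  xs.foldl (fun acc x => PySem.List.insertBy (fun a b => tripLt b a) x acc) []

-- ===== PORT A =====
-- the while-loop of A for one row: state (low, prev), building the appended tuples in order
def loopA (n m i : Int) (f : List Int) (l : Int) : Nat → Bool → List (Int × Int × Int)
  | low, prev =>
    if h : 0 < low ∧ ((low : Int) < m ∧ f.getD (low - 1) 0 = l) then
      (min (if m > ((low - 1 : Nat) : Int) then m - ((low - 1 : Nat) : Int) else 1) (n - i), i, ((low - 1 : Nat) : Int))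
        :: loopA n m i f l (low - 1) true
    else if prev then []
    else [(min (if m > (low : Int) then m - (low : Int) else 1) (n - i), i, (low : Int))]
  termination_by low _ => low
  decreasing_by omega

def best_lower (n : Int) (m : Int) (field : List (List Int)) (l : Int) : List (Int × Int × Int) :=
  sortedRevTrip ((PySem.List.enumerate field 0).foldl
    (fun lower p => lower ++ loopA n m p.1 p.2 l (PySem.List.bisectRight p.2 l) false) [])

-- ===== PORT B =====
-- one row of B: bisect, forward run count over f[:r], then direct emission
def rowB (n m i : Int) (f : List Int) (l : Int) : List (Int × Int × Int) :=
  let r := PySem.List.bisectRight f l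
  let run := (f.take r).foldl (fun run x => if x = l then run + 1 else 0) 0
  if 0 < run ∧ (r : Int) < m then
    (List.range run).map (fun (j : Nat) => (min (m - ((r : Int) - 1 - (j : Int))) (n - i), i, (r : Int) - 1 - (j : Int)))
  else
    [(if m > (r : Int) then min (m - (r : Int)) (n - i) else min 1 (n - i), i, (r : Int))]

def best_lower_alt (n : Int) (m : Int) (field : List (List Int)) (l : Int) : List (Int × Int × Int) :=
  sortedRevTrip ((PySem.List.enumerate field 0).foldl
    (fun out p => out ++ rowB n m p.1 p.2 l) [])

-- ===== PRECONDITION & SPEC =====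
def Spec_best_lower (n : Int) (m : Int) (field : List (List Int)) (l : Int) (out : List (Int × Int × Int)) : Prop := out = best_lower_alt n m field l
instance (n : Int) (m : Int) (field : List (List Int)) (l : Int) (out : List (Int × Int × Int)) : Decidable (Spec_best_lower n m field l out) := by unfold Spec_best_lower; infer_instance

-- ===== CLAIM (what is proved, stated in full; the proofs are below) =====
def Claim_equal_best_lower : Prop := ∀ (n : Int) (m : Int) (field : List (List Int)) (l : Int), Dom_best_lower n m field l → Spec_best_lower n m field l (best_lower n m field l)

-- ===== LEMMAS AND PROOFS =====

-- abbreviation used only in the proofs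
def runC (f : List Int) (l : Int) (r : Nat) : Nat :=
  (f.take r).foldl (fun run x => if x = l then run + 1 else 0) 0

lemma runC_succ (f : List Int) (l : Int) (r : Nat) (h : r < f.length) :
    runC f l (r + 1) = if f.getD r 0 = l then runC f l r + 1 else 0 := by
  unfold runC
  rw [List.take_add_one, List.getElem?_eq_getElem h, Option.toList_some, List.foldl_append,
    List.foldl_cons, List.foldl_nil, List.getD, List.getElem?_eq_getElem h, Option.getD_some]

lemma runC_pos (f : List Int) (l : Int) (r : Nat) (h : r ≤ f.length) (hp : 0 < runC f l r) :
    0 < r ∧ f.getD (r - 1) 0 = l := by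
  cases r with
  | zero => simp [runC] at hp
  | succ s =>
    rw [runC_succ f l s (by omega)] at hp
    refine ⟨by omega, ?_⟩
    by_contra hc
    rw [if_neg (by simpa [List.getD] using hc)] at hp
    omega

lemma bl_le (f : List Int) (l : Int) :
    ∀ (fuel lo hi : Nat), lo ≤ hi → PySem.List.bisectRightLoop f l fuel lo hi ≤ hi := by
  intro fuel
  induction fuel with
  | zero => intro lo hi h; simpa [PySem.List.bisectRightLoop] using h
  | succ k ih =>
    intro lo hi h
    rw [PySem.List.bisectRightLoop]
    split
    · rename_i hlt
      cases hg : f[(lo + hi) / 2]? with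
      | none => exact h
      | some y =>
        simp only []
        split
        · exact le_trans (ih lo ((lo + hi) / 2) (by omega)) (by omega)
        · exact ih ((lo + hi) / 2 + 1) hi (by omega)
    · exact h

lemma bisect_le (f : List Int) (l : Int) : PySem.List.bisectRight f l ≤ f.length := by
  unfold PySem.List.bisectRight
  exact bl_le f l f.length 0 f.length (by omega)

def descMap (n m i : Int) (r : Nat) (k : Nat) : List (Int × Int × Int) :=
  (List.range k).map (fun (j : Nat) => (min (m - ((r : Int) - 1 - (j : Int))) (n - i), i, (r : Int) - 1 - (j : Int)))

lemma descMap_succ (n m i : Int) (r k : Nat) :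
    descMap n m i (r + 1) (k + 1)
      = (min (m - (r : Int)) (n - i), i, (r : Int)) :: descMap n m i r k := by
  unfold descMap
  rw [List.range_succ_eq_map]
  simp only [List.map_cons, List.map_map]
  congr 1
  · push_cast
    norm_num
  · apply List.map_congr_left
    intro j hj
    simp only [Function.comp_apply, Prod.mk.injEq]
    refine ⟨?_, trivial, ?_⟩ <;> · push_cast; ring_nf

lemma loopA_true (n m i : Int) (f : List Int) (l : Int) :
    ∀ r : Nat, r ≤ f.length → (r : Int) < m →
      loopA n m i f l r true = descMap n m i r (runC f l r) := by
  intro r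
  induction r with
  | zero => intro _ _; rw [loopA]; simp [descMap, runC]
  | succ s ih =>
    intro hle hm
    rw [loopA]
    simp only [Nat.add_sub_cancel]
    by_cases hc : f.getD s 0 = l
    · rw [dif_pos ⟨Nat.succ_pos s, hm, hc⟩]
      rw [runC_succ f l s (by omega), if_pos hc]
      rw [ih (by omega) (by push_cast at hm ⊢; omega)]
      rw [descMap_succ, if_pos (show m > (s : Int) by push_cast at hm ⊢; omega)]
    · rw [dif_neg (by rintro ⟨-, -, h3⟩; exact hc h3)]
      rw [if_pos trivial, runC_succ f l s (by omega), if_neg hc]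
      simp [descMap]

lemma rowB_def (n m i : Int) (f : List Int) (l : Int) :
    rowB n m i f l
      = (if 0 < runC f l (PySem.List.bisectRight f l) ∧ ((PySem.List.bisectRight f l : Nat) : Int) < m
         then descMap n m i (PySem.List.bisectRight f l) (runC f l (PySem.List.bisectRight f l))
         else [(if m > ((PySem.List.bisectRight f l : Nat) : Int)
                then min (m - ((PySem.List.bisectRight f l : Nat) : Int)) (n - i)
                else min 1 (n - i), i, ((PySem.List.bisectRight f l : Nat) : Int))]) := rfl

lemma row_eq (n m i : Int) (f : List Int) (l : Int) :
    loopA n m i f l (PySem.List.bisectRight f l) false = rowB n m i f l := by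
  rw [rowB_def]
  have hrle := bisect_le f l
  by_cases hbr : 0 < runC f l (PySem.List.bisectRight f l) ∧ ((PySem.List.bisectRight f l : Nat) : Int) < m
  · rw [if_pos hbr]
    obtain ⟨hrpos, hgl⟩ := runC_pos f l _ hrle hbr.1
    cases hr : PySem.List.bisectRight f l with
    | zero => rw [hr] at hrpos; omega
    | succ s =>
      rw [hr] at hrle hgl hbr
      rw [loopA]
      simp only [Nat.add_sub_cancel]
      rw [dif_pos ⟨Nat.succ_pos s, hbr.2, by simpa using hgl⟩]
      rw [loopA_true n m i f l s (by omega) (by have := hbr.2; push_cast at this ⊢; omega)]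
      rw [runC_succ f l s (by omega)]
      rw [if_pos (show f.getD s 0 = l by simpa using hgl)]
      rw [descMap_succ]
      rw [if_pos (show m > (s : Int) by have := hbr.2; push_cast at this ⊢; omega)]
  · rw [if_neg hbr]
    have hnc : ¬(0 < PySem.List.bisectRight f l ∧
        (((PySem.List.bisectRight f l : Nat) : Int) < m ∧
         f.getD (PySem.List.bisectRight f l - 1) 0 = l)) := by
      rintro ⟨h1, h2, h3⟩
      apply hbr
      refine ⟨?_, h2⟩
      cases hr : PySem.List.bisectRight f l with
      | zero => omega
      | succ s =>
        rw [hr] at h3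
        rw [runC_succ f l s (by rw [hr] at hrle; omega), if_pos (by simpa using h3)]
        omega
    rw [loopA, dif_neg hnc, if_neg (by simp)]
    split_ifs <;> simp

-- ===== VERDICT (by name: the statement is the Claim_ definition above) =====
theorem best_lower_spec : Claim_equal_best_lower := by
  intro n m field l _
  unfold Spec_best_lower best_lower best_lower_alt
  congr 1
  have h : (fun (lower : List (Int × Int × Int)) (p : Int × List Int) =>
      lower ++ loopA n m p.1 p.2 l (PySem.List.bisectRight p.2 l) false)
      = (fun out p => out ++ rowB n m p.1 p.2 l) := by
    funext a p; rw [row_eq]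
  rw [h]
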